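-- pv_equiv track=rewrite | github.com/CptCrasher/Visual-Sorting-Algorithm | sortingAlgorithms.py | colorAlternator
-- ===== SOURCE A (Python) =====
-- def colorAlternator(data):
--     dataSize = len(data)
--     lightenBar = True
--     colorArray = []
--     for i in range(dataSize):
--         if lightenBar == True:
--             colorArray.append('#6967a1')
--             lightenBar = False
--         else:
--             colorArray.append('#545283')
--             lightenBar = True
--     return colorArray
-- ===== SOURCE B (Python) =====
-- def colorAlternator(data):
--     n = len(data)
--     return (['#6967a1', '#545283'] * ((n + 1) // 2))[:n]
-- ===== Notes on version B (the rewrite author's own statement) =====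
-- stated objective: simpler
-- what changed: Replaces the per-index loop with its toggling boolean flag by a single replicate-the-two-color-pattern-and-trim expression.
import Mathlib
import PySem

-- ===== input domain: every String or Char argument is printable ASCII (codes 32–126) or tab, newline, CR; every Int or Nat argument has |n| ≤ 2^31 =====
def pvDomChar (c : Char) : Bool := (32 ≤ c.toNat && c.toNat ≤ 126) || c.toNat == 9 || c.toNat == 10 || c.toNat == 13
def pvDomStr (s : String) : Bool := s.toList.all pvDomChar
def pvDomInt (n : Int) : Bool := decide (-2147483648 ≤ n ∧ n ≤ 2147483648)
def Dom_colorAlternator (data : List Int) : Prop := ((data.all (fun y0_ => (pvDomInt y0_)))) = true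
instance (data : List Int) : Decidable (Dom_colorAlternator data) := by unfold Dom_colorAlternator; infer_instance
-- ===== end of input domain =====

-- B replaces A's per-index loop and toggling boolean flag by one replicate-and-trim expression (objective: simpler).

-- ===== PORT A =====
-- loop body: ignores i, toggles the flag, appends one color at the end
def colorAlternatorStep (st : Bool × List String) (_i : Int) : Bool × List String :=
  if st.1 = true then (false, st.2 ++ ["#6967a1"]) else (true, st.2 ++ ["#545283"])

def colorAlternator (data : List Int) : List String :=
  let dataSize : Int := data.length
  let st := (PySem.List.pyRange 0 dataSize 1).foldl colorAlternatorStep (true, [])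
  st.2

-- ===== PORT B =====
def colorAlternator_alt (data : List Int) : List String :=
  let n := data.length
  ((List.replicate ((n + 1) / 2) ["#6967a1", "#545283"]).flatten).take n

-- ===== PRECONDITION & SPEC =====
def Spec_colorAlternator (data : List Int) (out : List String) : Prop := out = colorAlternator_alt data
instance (data : List Int) (out : List String) : Decidable (Spec_colorAlternator data out) := by unfold Spec_colorAlternator; infer_instance

-- ===== CLAIM (what is proved, stated in full; the proofs are below) =====
def Claim_equal_colorAlternator : Prop := ∀ (data : List Int), Dom_colorAlternator data → Spec_colorAlternator data (colorAlternator data)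

-- ===== LEMMAS AND PROOFS =====

-- front-to-back closed form of the alternating list, parameterised by the flag
def altF : Nat → Bool → List String
  | 0, _ => []
  | n + 1, b => (if b then "#6967a1" else "#545283") :: altF n (!b)

-- A's foldl ignores the range elements; only the length matters
theorem foldl_step_eq (l : List Int) (b : Bool) (acc : List String) :
    (l.foldl colorAlternatorStep (b, acc)).2 = acc ++ altF l.length b := by
  induction l generalizing b acc with
  | nil => simp [altF]
  | cons x xs ih =>
    cases b <;> simp [List.foldl, colorAlternatorStep, ih, altF]

-- B's replicate-and-trim equals the closed form, for any big enough replication count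
theorem take_flatten_replicate (m n : Nat) (h : n ≤ 2 * m) :
    ((List.replicate m ["#6967a1", "#545283"]).flatten).take n = altF n true := by
  induction m generalizing n with
  | zero =>
    interval_cases n
    simp [altF]
  | succ m ih =>
    match n with
    | 0 => simp [altF]
    | 1 => simp [List.replicate, altF]
    | n + 2 =>
      have : n ≤ 2 * m := by omega
      simp [List.replicate_succ, altF, ih n this]

-- ===== VERDICT (by name: the statement is the Claim_ definition above) =====
theorem colorAlternator_spec : Claim_equal_colorAlternator := by
  intro data _
  show colorAlternator data = colorAlternator_alt data
  unfold colorAlternator colorAlternator_alt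
  have hlen : (PySem.List.pyRange 0 (data.length : Int) 1).length = data.length := by
    simp [PySem.List.length_pyRange_one]
  rw [show ((PySem.List.pyRange 0 (data.length : Int) 1).foldl colorAlternatorStep (true, [])).2
        = [] ++ altF (PySem.List.pyRange 0 (data.length : Int) 1).length true from
      foldl_step_eq _ true []]
  rw [hlen, List.nil_append]
  exact (take_flatten_replicate _ _ (by omega)).symm
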